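-- pv_equiv track=rewrite | github.com/paiml/depyler | examples/hard_merge_intervals.py | max_overlap_depth
-- ===== SOURCE A (Python) =====
-- def max_overlap_depth(starts: list[int], ends: list[int], max_val: int) -> int:
--     """Find maximum number of overlapping intervals at any point."""
--     timeline: list[int] = [0] * (max_val + 2)
--     n: int = len(starts)
--     i: int = 0
--     while i < n:
--         if starts[i] >= 0 and starts[i] <= max_val:
--             timeline[starts[i]] = timeline[starts[i]] + 1
--         if ends[i] >= 0 and ends[i] <= max_val:
--             timeline[ends[i]] = timeline[ends[i]] - 1
--         i = i + 1
--     best: int = 0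
--     curr: int = 0
--     j: int = 0
--     while j <= max_val:
--         curr = curr + timeline[j]
--         if curr > best:
--             best = curr
--         j = j + 1
--     return best
-- ===== SOURCE B (Python) =====
-- def max_overlap_depth(starts: list[int], ends: list[int], max_val: int) -> int:
--     """Find maximum number of overlapping intervals at any point.
--
--     Event-sweep: net change per position in a dict, sweep the sorted event
--     positions with a prefix sum instead of scanning the whole 0..max_val range.
--     """
--     delta: dict[int, int] = {}
--     for s, e in zip(starts, ends):
--         if 0 <= s <= max_val:
--             delta[s] = delta.get(s, 0) + 1
--         if 0 <= e <= max_val: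
--             delta[e] = delta.get(e, 0) - 1
--     best = 0
--     curr = 0
--     for p in sorted(delta):
--         curr += delta[p]
--         if curr > best:
--             best = curr
--     return best
-- ===== Notes on version B (the rewrite author's own statement) =====
-- stated objective: alternative
-- what changed: Replaces the dense timeline array of size max_val+2 and the full 0..max_val scan by a sparse per-position delta dict over zip(starts, ends) and a prefix-sum sweep over the sorted event positions only.
import Mathlib
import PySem

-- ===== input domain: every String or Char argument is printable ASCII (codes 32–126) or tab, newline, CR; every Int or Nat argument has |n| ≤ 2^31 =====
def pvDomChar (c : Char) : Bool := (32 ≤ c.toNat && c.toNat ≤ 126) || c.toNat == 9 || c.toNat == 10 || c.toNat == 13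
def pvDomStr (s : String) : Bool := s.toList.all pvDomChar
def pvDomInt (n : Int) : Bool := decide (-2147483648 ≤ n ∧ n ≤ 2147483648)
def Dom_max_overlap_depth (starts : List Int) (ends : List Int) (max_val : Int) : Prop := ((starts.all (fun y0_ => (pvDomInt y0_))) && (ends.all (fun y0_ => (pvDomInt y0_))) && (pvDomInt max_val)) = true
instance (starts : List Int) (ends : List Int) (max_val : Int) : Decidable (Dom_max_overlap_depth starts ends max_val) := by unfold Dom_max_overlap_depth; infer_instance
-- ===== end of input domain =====

-- B replaces A's dense 0..max_val timeline scan by a sparse delta dict and a sweep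
-- over the sorted event positions (objective: alternative algorithm, same result).

-- ===== PORT A =====
-- Python's list 'timeline' is represented as Array Int (O(1) indexing, as in CPython);
-- all timeline indices are guarded to [0, max_val], so setIfInBounds/getD are exact.
def max_overlap_depth (starts : List Int) (ends : List Int) (max_val : Int) : Int :=
  let timeline0 : Array Int := Array.replicate (max_val + 2).toNat 0
  let n : Int := PySem.List.len starts
  let timeline :=
    (PySem.List.pyRange 0 n 1).foldl (fun tl i =>
      let tl :=
        if 0 ≤ PySem.List.pyGetD starts i 0 ∧ PySem.List.pyGetD starts i 0 ≤ max_val then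
          tl.setIfInBounds (PySem.List.pyGetD starts i 0).toNat
            (tl.getD (PySem.List.pyGetD starts i 0).toNat 0 + 1)
        else tl
      if 0 ≤ PySem.List.pyGetD ends i 0 ∧ PySem.List.pyGetD ends i 0 ≤ max_val then
        tl.setIfInBounds (PySem.List.pyGetD ends i 0).toNat
          (tl.getD (PySem.List.pyGetD ends i 0).toNat 0 - 1)
      else tl) timeline0
  let bc :=
    (PySem.List.pyRange 0 (max_val + 1) 1).foldl (fun (bc : Int × Int) j =>
      let curr := bc.2 + timeline.getD j.toNat 0
      (if curr > bc.1 then curr else bc.1, curr)) (0, 0)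
  bc.1

-- ===== PORT B =====
-- delta[p] in the sweep is ported as getD delta p 0: p is always a key of delta there, so this is exact.
def max_overlap_depth_alt (starts : List Int) (ends : List Int) (max_val : Int) : Int :=
  let delta :=
    (starts.zip ends).foldl (fun (d : PySem.Dict Int Int) p =>
      let d := if 0 ≤ p.1 ∧ p.1 ≤ max_val then d.insert p.1 (d.getD p.1 0 + 1) else d
      if 0 ≤ p.2 ∧ p.2 ≤ max_val then d.insert p.2 (d.getD p.2 0 - 1) else d)
      PySem.Dict.empty
  let bc :=
    (PySem.List.sorted delta.keys (fun k => k) false).foldl (fun (bc : Int × Int) p =>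
      let curr := bc.2 + delta.getD p 0
      (if curr > bc.1 then curr else bc.1, curr)) (0, 0)
  bc.1

-- ===== PRECONDITION & SPEC =====
-- A raises IndexError (ends[i]) exactly when ends is shorter than starts; those inputs are excluded.
def Pre_max_overlap_depth (starts : List Int) (ends : List Int) (max_val : Int) : Prop :=
  starts.length ≤ ends.length
instance (starts : List Int) (ends : List Int) (max_val : Int) : Decidable (Pre_max_overlap_depth starts ends max_val) := by unfold Pre_max_overlap_depth; infer_instance

def pvWitness_max_overlap_depth : List Int × List Int × Int := ([1, 2, 0], [4, 3, 5], 6)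

def Spec_max_overlap_depth (starts : List Int) (ends : List Int) (max_val : Int) (out : Int) : Prop := out = max_overlap_depth_alt starts ends max_val
instance (starts : List Int) (ends : List Int) (max_val : Int) (out : Int) : Decidable (Spec_max_overlap_depth starts ends max_val out) := by unfold Spec_max_overlap_depth; infer_instance

-- ===== CLAIM (what is proved, stated in full; the proofs are below) =====
def Claim_equal_max_overlap_depth : Prop := ∀ (starts : List Int) (ends : List Int) (max_val : Int), Dom_max_overlap_depth starts ends max_val → Pre_max_overlap_depth starts ends max_val → Spec_max_overlap_depth starts ends max_val (max_overlap_depth starts ends max_val)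

-- ===== LEMMAS AND PROOFS =====

-- net change a sweep sees at position j, from the event pairs L
def evC (L : List (Int × Int)) (j : Int) : Int :=
  (L.countP (fun p => p.1 == j) : Int) - (L.countP (fun p => p.2 == j) : Int)

-- the body of A's first loop, as a function of the (start, end) pair
def stepA (max_val : Int) (tl : Array Int) (p : Int × Int) : Array Int :=
  let tl :=
    if 0 ≤ p.1 ∧ p.1 ≤ max_val then
      tl.setIfInBounds p.1.toNat (tl.getD p.1.toNat 0 + 1)
    else tl
  if 0 ≤ p.2 ∧ p.2 ≤ max_val then
    tl.setIfInBounds p.2.toNat (tl.getD p.2.toNat 0 - 1)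
  else tl

-- the body of B's dict-building loop
def stepB (max_val : Int) (d : PySem.Dict Int Int) (p : Int × Int) : PySem.Dict Int Int :=
  let d := if 0 ≤ p.1 ∧ p.1 ≤ max_val then d.insert p.1 (d.getD p.1 0 + 1) else d
  if 0 ≤ p.2 ∧ p.2 ≤ max_val then d.insert p.2 (d.getD p.2 0 - 1) else d

-- the shared sweep loop
def sweep (g : Int → Int) (l : List Int) (bc : Int × Int) : Int × Int :=
  l.foldl (fun bc j =>
    let curr := bc.2 + g j
    (if curr > bc.1 then curr else bc.1, curr)) bc

lemma foldl_getD_range {α β : Type} (L : List α) (d : α) (f : β → α → β) (init : β) :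
    (List.range L.length).foldl (fun acc k => f acc (L.getD k d)) init = L.foldl f init := by
  induction L generalizing init with
  | nil => simp
  | cons x t ih =>
    simp only [List.length_cons, List.range_succ_eq_map, List.foldl_cons, List.foldl_map,
      List.getD_cons_zero, List.getD_cons_succ]
    exact ih (f init x)

lemma firstLoop_eq (starts ends : List Int) (max_val : Int)
    (h : starts.length ≤ ends.length) (tl0 : Array Int) :
    (PySem.List.pyRange 0 (PySem.List.len starts) 1).foldl (fun tl i =>
      let tl :=
        if 0 ≤ PySem.List.pyGetD starts i 0 ∧ PySem.List.pyGetD starts i 0 ≤ max_val then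
          tl.setIfInBounds (PySem.List.pyGetD starts i 0).toNat
            (tl.getD (PySem.List.pyGetD starts i 0).toNat 0 + 1)
        else tl
      if 0 ≤ PySem.List.pyGetD ends i 0 ∧ PySem.List.pyGetD ends i 0 ≤ max_val then
        tl.setIfInBounds (PySem.List.pyGetD ends i 0).toNat
          (tl.getD (PySem.List.pyGetD ends i 0).toNat 0 - 1)
      else tl) tl0
    = (starts.zip ends).foldl (stepA max_val) tl0 := by
  have hzlen : (starts.zip ends).length = starts.length := by
    simp [List.length_zip]; omega
  rw [← foldl_getD_range (starts.zip ends) (0, 0) (stepA max_val) tl0, hzlen,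
    PySem.List.len_eq, PySem.List.pyRange_one]
  simp only [sub_zero, Int.toNat_natCast, List.foldl_map, zero_add]
  apply PySem.List.foldl_congr_mem
  intro acc k hk
  have hk' : k < starts.length := List.mem_range.mp hk
  have hke : k < ends.length := lt_of_lt_of_le hk' h
  have hkz : k < (starts.zip ends).length := by rw [hzlen]; exact hk'
  simp only [PySem.List.pyGetD_natCast, List.getD_eq_getElem starts 0 hk',
    List.getD_eq_getElem ends 0 hke, List.getD_eq_getElem (starts.zip ends) (0, 0) hkz,
    List.getElem_zip, stepA]

lemma stepA_size (max_val : Int) (tl : Array Int) (p : Int × Int) :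
    (stepA max_val tl p).size = tl.size := by
  simp only [stepA]
  split_ifs <;> simp

lemma arrSet_getD (max_val : Int) (a : Array Int) (ha : a.size = (max_val + 2).toNat)
    (x v j : Int) (hx0 : 0 ≤ x) (hx1 : x ≤ max_val) (hj0 : 0 ≤ j) (hj1 : j ≤ max_val) :
    (a.setIfInBounds x.toNat v).getD j.toNat 0
      = if x = j then v else a.getD j.toNat 0 := by
  have hmv : 0 ≤ max_val := le_trans hj0 hj1
  have hjlt : j.toNat < a.size := by omega
  have hxlt : x.toNat < a.size := by omega
  rw [Array.getD_eq_getD_getElem?, Array.getD_eq_getD_getElem?, Array.getElem?_setIfInBounds]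
  by_cases hxy : x = j
  · rw [if_pos (by omega), if_pos hxy, if_pos hxlt]
    rfl
  · rw [if_neg (by omega), if_neg hxy]

lemma condInc_getD (max_val : Int) (tl : Array Int) (htl : tl.size = (max_val + 2).toNat)
    (x j : Int) (hj0 : 0 ≤ j) (hj1 : j ≤ max_val) :
    ((if 0 ≤ x ∧ x ≤ max_val then
        tl.setIfInBounds x.toNat (tl.getD x.toNat 0 + 1) else tl).getD j.toNat 0)
      = tl.getD j.toNat 0 + (if x = j then 1 else 0) := by
  by_cases hx : 0 ≤ x ∧ x ≤ max_val
  · rw [if_pos hx, arrSet_getD max_val tl htl x _ j hx.1 hx.2 hj0 hj1]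
    by_cases hxy : x = j
    · subst hxy; simp
    · simp [hxy]
  · rw [if_neg hx, if_neg (fun hxy : x = j => hx ⟨by omega, by omega⟩), add_zero]

lemma condDec_getD (max_val : Int) (tl : Array Int) (htl : tl.size = (max_val + 2).toNat)
    (x j : Int) (hj0 : 0 ≤ j) (hj1 : j ≤ max_val) :
    ((if 0 ≤ x ∧ x ≤ max_val then
        tl.setIfInBounds x.toNat (tl.getD x.toNat 0 - 1) else tl).getD j.toNat 0)
      = tl.getD j.toNat 0 - (if x = j then 1 else 0) := by
  by_cases hx : 0 ≤ x ∧ x ≤ max_val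
  · rw [if_pos hx, arrSet_getD max_val tl htl x _ j hx.1 hx.2 hj0 hj1]
    by_cases hxy : x = j
    · subst hxy; simp
    · simp [hxy]
  · rw [if_neg hx, if_neg (fun hxy : x = j => hx ⟨by omega, by omega⟩), sub_zero]

lemma condA_size (tl : Array Int) (x v : Int) (c : Prop) [Decidable c] :
    ((if c then tl.setIfInBounds x.toNat v else tl)).size = tl.size := by
  split_ifs <;> simp

lemma stepA_getD (max_val : Int) (tl : Array Int) (p : Int × Int)
    (htl : tl.size = (max_val + 2).toNat) (j : Int) (hj0 : 0 ≤ j) (hj1 : j ≤ max_val) :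
    (stepA max_val tl p).getD j.toNat 0
      = tl.getD j.toNat 0 + (if p.1 = j then 1 else 0) - (if p.2 = j then 1 else 0) := by
  simp only [stepA]
  rw [condDec_getD max_val _ (by rw [condA_size]; exact htl) p.2 j hj0 hj1,
    condInc_getD max_val tl htl p.1 j hj0 hj1]

lemma evC_cons (p : Int × Int) (t : List (Int × Int)) (j : Int) :
    evC (p :: t) j = evC t j + (if p.1 = j then 1 else 0) - (if p.2 = j then 1 else 0) := by
  simp only [evC, List.countP_cons]
  by_cases h1 : p.1 = j <;> by_cases h2 : p.2 = j <;> simp [h1, h2] <;> push_cast <;> ring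

lemma tl_char (max_val : Int) (L : List (Int × Int)) (tl : Array Int)
    (htl : tl.size = (max_val + 2).toNat) (j : Int) (hj0 : 0 ≤ j) (hj1 : j ≤ max_val) :
    (L.foldl (stepA max_val) tl).getD j.toNat 0 = tl.getD j.toNat 0 + evC L j := by
  induction L generalizing tl with
  | nil => simp [evC]
  | cons p t ih =>
    rw [List.foldl_cons, ih (stepA max_val tl p) (by rw [stepA_size]; exact htl),
      stepA_getD max_val tl p htl j hj0 hj1, evC_cons]
    ring

lemma condInsInc_getD (max_val : Int) (d : PySem.Dict Int Int) (x j : Int)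
    (hj0 : 0 ≤ j) (hj1 : j ≤ max_val) :
    ((if 0 ≤ x ∧ x ≤ max_val then d.insert x (d.getD x 0 + 1) else d).getD j 0)
      = d.getD j 0 + (if x = j then 1 else 0) := by
  by_cases hx : 0 ≤ x ∧ x ≤ max_val
  · rw [if_pos hx, PySem.Dict.getD_insert]
    by_cases hxy : x = j
    · subst hxy; simp
    · simp [hxy, Ne.symm hxy]
  · rw [if_neg hx, if_neg (fun hxy : x = j => hx ⟨by omega, by omega⟩), add_zero]

lemma condInsDec_getD (max_val : Int) (d : PySem.Dict Int Int) (x j : Int)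
    (hj0 : 0 ≤ j) (hj1 : j ≤ max_val) :
    ((if 0 ≤ x ∧ x ≤ max_val then d.insert x (d.getD x 0 - 1) else d).getD j 0)
      = d.getD j 0 - (if x = j then 1 else 0) := by
  by_cases hx : 0 ≤ x ∧ x ≤ max_val
  · rw [if_pos hx, PySem.Dict.getD_insert]
    by_cases hxy : x = j
    · subst hxy; simp
    · simp [hxy, Ne.symm hxy]
  · rw [if_neg hx, if_neg (fun hxy : x = j => hx ⟨by omega, by omega⟩), sub_zero]

lemma stepB_getD (max_val : Int) (d : PySem.Dict Int Int) (p : Int × Int) (j : Int)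
    (hj0 : 0 ≤ j) (hj1 : j ≤ max_val) :
    (stepB max_val d p).getD j 0
      = d.getD j 0 + (if p.1 = j then 1 else 0) - (if p.2 = j then 1 else 0) := by
  simp only [stepB]
  rw [condInsDec_getD max_val _ p.2 j hj0 hj1, condInsInc_getD max_val d p.1 j hj0 hj1]

lemma dict_char (max_val : Int) (L : List (Int × Int)) (d : PySem.Dict Int Int)
    (j : Int) (hj0 : 0 ≤ j) (hj1 : j ≤ max_val) :
    (L.foldl (stepB max_val) d).getD j 0 = d.getD j 0 + evC L j := by
  induction L generalizing d with
  | nil => simp [evC]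
  | cons p t ih =>
    rw [List.foldl_cons, ih (stepB max_val d p), stepB_getD max_val d p j hj0 hj1, evC_cons]
    ring

lemma stepB_keys_mem (max_val : Int) (d : PySem.Dict Int Int) (p : Int × Int) (j : Int) :
    j ∈ (stepB max_val d p).keys ↔
      j ∈ d.keys ∨ (0 ≤ p.1 ∧ p.1 ≤ max_val ∧ j = p.1) ∨ (0 ≤ p.2 ∧ p.2 ≤ max_val ∧ j = p.2) := by
  simp only [stepB]
  split_ifs with h1 h2 h2 <;>
    (try simp only [PySem.Dict.mem_keys_insert]) <;> constructor <;> intro hh <;> tauto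

lemma keys_mem_foldl (max_val : Int) (L : List (Int × Int)) (d : PySem.Dict Int Int) (j : Int) :
    j ∈ (L.foldl (stepB max_val) d).keys ↔
      j ∈ d.keys ∨ ∃ p ∈ L, (0 ≤ p.1 ∧ p.1 ≤ max_val ∧ j = p.1) ∨ (0 ≤ p.2 ∧ p.2 ≤ max_val ∧ j = p.2) := by
  induction L generalizing d with
  | nil => simp
  | cons p t ih =>
    rw [List.foldl_cons, ih (stepB max_val d p), stepB_keys_mem]
    simp only [List.mem_cons]
    constructor
    · rintro ((hk | hp) | ⟨q, hq, hq2⟩)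
      · exact Or.inl hk
      · exact Or.inr ⟨p, Or.inl rfl, hp⟩
      · exact Or.inr ⟨q, Or.inr hq, hq2⟩
    · rintro (hk | ⟨q, (rfl | hq), hq2⟩)
      · exact Or.inl (Or.inl hk)
      · exact Or.inl (Or.inr hq2)
      · exact Or.inr ⟨q, hq, hq2⟩

lemma keys_nodup_foldl (max_val : Int) (L : List (Int × Int)) (d : PySem.Dict Int Int)
    (hd : d.keys.Nodup) : (L.foldl (stepB max_val) d).keys.Nodup := by
  induction L generalizing d with
  | nil => exact hd
  | cons p t ih =>
    rw [List.foldl_cons]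
    apply ih
    simp only [stepB]
    split_ifs <;> first
      | exact PySem.Dict.nodup_keys_insert _ _ _ (PySem.Dict.nodup_keys_insert _ _ _ hd)
      | exact PySem.Dict.nodup_keys_insert _ _ _ hd
      | exact hd

lemma sweep_filter (g : Int → Int) (l : List Int) (b c : Int) (h : c ≤ b) :
    sweep g l (b, c) = sweep g (l.filter (fun j => decide (g j ≠ 0))) (b, c) := by
  induction l generalizing b c with
  | nil => rfl
  | cons j t ih =>
    simp only [sweep, List.foldl_cons, List.filter_cons] at *
    by_cases hg : g j = 0
    · rw [hg, add_zero, if_neg (not_lt.mpr h)]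
      simpa using ih b c h
    · rw [show (decide ((g j) ≠ 0)) = true from by simp [hg], if_pos rfl]
      simp only [List.foldl_cons]
      exact ih _ _ (by split_ifs <;> omega)

lemma pairwise_lt_eq_of_mem {l1 l2 : List Int} (h1 : l1.Pairwise (· < ·))
    (h2 : l2.Pairwise (· < ·)) (hm : ∀ j, j ∈ l1 ↔ j ∈ l2) : l1 = l2 := by
  have n1 : l1.Nodup := h1.imp (fun h => ne_of_lt h)
  have n2 : l2.Nodup := h2.imp (fun h => ne_of_lt h)
  have hp : l1.Perm l2 := by
    rw [List.perm_ext_iff_of_nodup n1 n2]; exact hm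
  exact List.Perm.eq_of_pairwise (fun a b _ _ hab hba => by omega) h1 h2 hp

lemma evC_ne_zero_mem_keys (max_val : Int) (L : List (Int × Int)) (j : Int)
    (hj0 : 0 ≤ j) (hj1 : j ≤ max_val) (h : evC L j ≠ 0) :
    j ∈ (L.foldl (stepB max_val) PySem.Dict.empty).keys := by
  by_contra hmem
  apply h
  have hall : ∀ p ∈ L, p.1 ≠ j ∧ p.2 ≠ j := by
    intro p hp
    constructor <;> intro he <;> exact hmem ((keys_mem_foldl max_val L _ j).mpr
      (Or.inr ⟨p, hp, by subst he; tauto⟩))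
  simp only [evC]
  rw [List.countP_eq_zero.mpr, List.countP_eq_zero.mpr]
  · ring
  · intro p hp; simpa using (hall p hp).2
  · intro p hp; simpa using (hall p hp).1

lemma mem_keys_bounds (max_val : Int) (L : List (Int × Int)) (j : Int)
    (h : j ∈ (L.foldl (stepB max_val) PySem.Dict.empty).keys) : 0 ≤ j ∧ j ≤ max_val := by
  rw [keys_mem_foldl] at h
  rcases h with h | ⟨p, _, h | h⟩
  · simp [PySem.Dict.keys_empty] at h
  · obtain ⟨a, b, c⟩ := h; subst c; exact ⟨a, b⟩
  · obtain ⟨a, b, c⟩ := h; subst c; exact ⟨a, b⟩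

-- ===== VERDICT (by name: the statement is the Claim_ definition above) =====
theorem max_overlap_depth_spec : Claim_equal_max_overlap_depth := by
  intro starts ends max_val _ hpre
  unfold Pre_max_overlap_depth at hpre
  unfold Spec_max_overlap_depth
  have h1 : max_overlap_depth starts ends max_val
      = (sweep (fun j => ((starts.zip ends).foldl (stepA max_val)
          (Array.replicate (max_val + 2).toNat 0)).getD j.toNat 0)
         (PySem.List.pyRange 0 (max_val + 1) 1) (0, 0)).1 := by
    rw [show max_overlap_depth starts ends max_val
        = (sweep (fun j => ((PySem.List.pyRange 0 (PySem.List.len starts) 1).foldl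
            (fun tl i =>
              let tl :=
                if 0 ≤ PySem.List.pyGetD starts i 0 ∧ PySem.List.pyGetD starts i 0 ≤ max_val then
                  tl.setIfInBounds (PySem.List.pyGetD starts i 0).toNat
                    (tl.getD (PySem.List.pyGetD starts i 0).toNat 0 + 1)
                else tl
              if 0 ≤ PySem.List.pyGetD ends i 0 ∧ PySem.List.pyGetD ends i 0 ≤ max_val then
                tl.setIfInBounds (PySem.List.pyGetD ends i 0).toNat
                  (tl.getD (PySem.List.pyGetD ends i 0).toNat 0 - 1)
              else tl) (Array.replicate (max_val + 2).toNat 0)).getD j.toNat 0)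
           (PySem.List.pyRange 0 (max_val + 1) 1) (0, 0)).1 from rfl,
      firstLoop_eq starts ends max_val hpre]
  have h2 : max_overlap_depth_alt starts ends max_val
      = (sweep (fun p => ((starts.zip ends).foldl (stepB max_val) PySem.Dict.empty).getD p 0)
         (PySem.List.sorted ((starts.zip ends).foldl (stepB max_val) PySem.Dict.empty).keys
           (fun k => k) false) (0, 0)).1 := rfl
  rw [h1, h2]
  set L := starts.zip ends with hLdef
  set tl := L.foldl (stepA max_val) (Array.replicate (max_val + 2).toNat 0) with htldef
  set delta := L.foldl (stepB max_val) PySem.Dict.empty with hdeltadef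
  set Ks := PySem.List.sorted delta.keys (fun k => k) false with hKsdef
  have hAg : sweep (fun j => tl.getD j.toNat 0) (PySem.List.pyRange 0 (max_val + 1) 1) (0, 0)
      = sweep (evC L) (PySem.List.pyRange 0 (max_val + 1) 1) (0, 0) := by
    simp only [sweep]
    apply PySem.List.foldl_congr_mem
    intro acc j hj
    have hb : 0 ≤ j ∧ j < max_val + 1 := by
      simpa [PySem.List.mem_pyRange_one] using hj
    have h0 : (Array.replicate (max_val + 2).toNat (0 : Int)).getD j.toNat 0 = 0 := by
      simp [Array.getD]
    have hc := tl_char max_val L (Array.replicate (max_val + 2).toNat 0) (by simp) j hb.1 (by omega)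
    rw [← htldef] at hc
    rw [hc, h0, zero_add]
  have hBg : sweep (fun p => delta.getD p 0) Ks (0, 0) = sweep (evC L) Ks (0, 0) := by
    simp only [sweep]
    apply PySem.List.foldl_congr_mem
    intro acc j hj
    have hjk : j ∈ delta.keys := by
      have := (PySem.List.sorted_perm delta.keys (fun k => k) false).mem_iff (a := j)
      rw [← hKsdef] at this
      exact this.mp hj
    have hb := mem_keys_bounds max_val L j (hdeltadef ▸ hjk)
    have hc := dict_char max_val L PySem.Dict.empty j hb.1 hb.2
    rw [← hdeltadef] at hc
    rw [hc, PySem.Dict.getD_empty, zero_add]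
  rw [hAg, hBg, sweep_filter _ _ _ _ (le_refl 0), sweep_filter _ Ks _ _ (le_refl 0)]
  have hfeq : (PySem.List.pyRange 0 (max_val + 1) 1).filter (fun j => decide (evC L j ≠ 0))
      = Ks.filter (fun j => decide (evC L j ≠ 0)) := by
    apply pairwise_lt_eq_of_mem
    · exact (PySem.List.pairwise_lt_pyRange_one 0 (max_val + 1)).filter _
    · have hnd : delta.keys.Nodup := hdeltadef ▸ keys_nodup_foldl max_val L PySem.Dict.empty (by simp)
      have hle : Ks.Pairwise (· ≤ ·) := by
        rw [hKsdef]; exact PySem.List.sorted_pairwise delta.keys (fun k => k)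
      have hnd' : Ks.Nodup := by
        rw [hKsdef]; exact ((PySem.List.sorted_perm delta.keys (fun k => k) false).nodup_iff).mpr hnd
      exact ((hle.and hnd').imp (fun h => lt_of_le_of_ne h.1 h.2)).filter _
    · intro j
      simp only [List.mem_filter, PySem.List.mem_pyRange_one, decide_eq_true_eq]
      constructor
      · rintro ⟨⟨hj0, hj1⟩, hne⟩
        refine ⟨?_, hne⟩
        have hjk : j ∈ delta.keys := hdeltadef ▸ evC_ne_zero_mem_keys max_val L j hj0 (by omega) hne
        have := (PySem.List.sorted_perm delta.keys (fun k => k) false).mem_iff (a := j)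
        rw [← hKsdef] at this
        exact this.mpr hjk
      · rintro ⟨hjk, hne⟩
        have hjk' : j ∈ delta.keys := by
          have := (PySem.List.sorted_perm delta.keys (fun k => k) false).mem_iff (a := j)
          rw [← hKsdef] at this
          exact this.mp hjk
        have hb := mem_keys_bounds max_val L j (hdeltadef ▸ hjk')
        exact ⟨⟨hb.1, by omega⟩, hne⟩
  rw [hfeq]
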